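-- pv_equiv track=rewrite | github.com/shitchell/o365-cli | o365/recordings.py | parse_vtt_transcript
-- ===== SOURCE A (Python) =====
-- def parse_vtt_transcript(vtt_content):
--     """Parse VTT transcript and extract text with timestamps
--
--     Args:
--         vtt_content: VTT file content
--
--     Returns:
--         List of (timestamp, text) tuples
--     """
--     import re
--
--     lines = vtt_content.split('\n')
--     entries = []
--
--     i = 0
--     while i < len(lines):
--         line = lines[i].strip()
--
--         # Look for timestamp lines (format: 00:00:00.000 --> 00:00:00.000)
--         if '-->' in line:
--             # Extract start time
--             start_time = line.split('-->')[0].strip()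
--
--             # Next lines are the text until we hit a blank line
--             text_lines = []
--             i += 1
--             while i < len(lines) and lines[i].strip():
--                 text_lines.append(lines[i].strip())
--                 i += 1
--
--             if text_lines:
--                 entries.append((start_time, ' '.join(text_lines)))
--
--         i += 1
--
--     return entries
-- ===== SOURCE B (Python) =====
-- def parse_vtt_transcript(vtt_content):
--     """Parse VTT transcript and extract text with timestamps (block-based)."""
--     # Group lines into blocks separated by whitespace-only lines.
--     blocks = []
--     current = []
--     for line in vtt_content.split('\n'):
--         if line.strip():
--             current.append(line)
--         else:
--             if current:
--                 blocks.append(current)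
--             current = []
--     if current:
--         blocks.append(current)
--
--     # Each block contributes at most one entry: from its first '-->' line.
--     entries = []
--     for block in blocks:
--         for idx, line in enumerate(block):
--             s = line.strip()
--             if '-->' in s:
--                 text = [l.strip() for l in block[idx + 1:]]
--                 if text:
--                     entries.append((s.split('-->')[0].strip(), ' '.join(text)))
--                 break
--     return entries
-- ===== Notes on version B (the rewrite author's own statement) =====
-- stated objective: idiomatic
-- what changed: B first splits the lines into blank-separated blocks and then emits one entry per block from its first timestamp-arrow line, replacing A's single index-driven while-loop with a nested consuming scan.
import Mathlib
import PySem

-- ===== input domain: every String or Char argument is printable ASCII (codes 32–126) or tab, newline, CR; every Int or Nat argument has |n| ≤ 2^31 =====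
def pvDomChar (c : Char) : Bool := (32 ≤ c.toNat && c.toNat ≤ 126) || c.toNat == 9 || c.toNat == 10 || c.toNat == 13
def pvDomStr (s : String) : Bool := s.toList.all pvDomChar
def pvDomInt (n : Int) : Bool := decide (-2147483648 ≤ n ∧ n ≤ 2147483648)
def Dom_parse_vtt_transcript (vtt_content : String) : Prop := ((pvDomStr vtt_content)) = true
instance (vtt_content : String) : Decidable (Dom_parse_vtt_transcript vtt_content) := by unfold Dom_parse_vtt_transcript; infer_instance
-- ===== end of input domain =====

-- B regroups the lines into blank-separated blocks and emits one entry per block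
-- (from its first '-->' line) instead of A's single index-walk; objective: idiomatic.

-- ===== PORT A =====
-- shared atoms of both Pythons: s.split(sep) for a nonempty literal sep (exact there),
-- 'line.strip()' non-emptiness, and the start time taken from a cue line
def pvSplit (s sep : String) : List String :=
  (PySem.Chars.splitOn s.toList sep.toList).map String.ofList

def pvNonblank (x : String) : Bool := PySem.Str.strip x != ""

def pvStart (s : String) : String :=
  PySem.Str.strip ((pvSplit s "-->").headD "")

-- A's while-loop over the line list: the inner while is the takeWhile/dropWhile
-- over the same 'lines[i].strip()' test, the outer 'i += 1' is the '.drop 1'.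
def pvALoop : List String → List (String × String)
  | [] => []
  | l :: rest =>
    let s := PySem.Str.strip l
    if PySem.Str.isIn "-->" s then
      let text := (rest.takeWhile pvNonblank).map PySem.Str.strip
      (if text.isEmpty then [] else [(pvStart s, PySem.Str.join " " text)]) ++
        pvALoop ((rest.dropWhile pvNonblank).drop 1)
    else
      pvALoop rest
termination_by ls => ls.length
decreasing_by
  · have h1 := List.length_dropWhile_le pvNonblank rest
    simp only [List.length_drop, List.length_cons]; omega
  · simp

def parse_vtt_transcript (vtt_content : String) : List (String × String) :=
  pvALoop (pvSplit vtt_content "\n")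

-- ===== PORT B =====
-- pass 1 of Source B: group lines into blocks, a new block at each whitespace-only line
def pvBlocks (cur : List String) : List String → List (List String)
  | [] => if cur.isEmpty then [] else [cur]
  | l :: rest =>
    if pvNonblank l then pvBlocks (cur ++ [l]) rest
    else (if cur.isEmpty then [] else [cur]) ++ pvBlocks [] rest

-- pass 2 of Source B: the inner for-with-break over one block
def pvBlockEntry : List String → List (String × String)
  | [] => []
  | l :: rest =>
    let s := PySem.Str.strip l
    if PySem.Str.isIn "-->" s then
      let text := rest.map PySem.Str.strip
      if text.isEmpty then [] else [(pvStart s, PySem.Str.join " " text)]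
    else
      pvBlockEntry rest

def parse_vtt_transcript_alt (vtt_content : String) : List (String × String) :=
  (pvBlocks [] (pvSplit vtt_content "\n")).flatMap pvBlockEntry

-- ===== PRECONDITION & SPEC =====
def Spec_parse_vtt_transcript (vtt_content : String) (out : List (String × String)) : Prop := out = parse_vtt_transcript_alt vtt_content
instance (vtt_content : String) (out : List (String × String)) : Decidable (Spec_parse_vtt_transcript vtt_content out) := by unfold Spec_parse_vtt_transcript; infer_instance

-- ===== CLAIM (what is proved, stated in full; the proofs are below) =====
def Claim_equal_parse_vtt_transcript : Prop := ∀ (vtt_content : String), Dom_parse_vtt_transcript vtt_content → Spec_parse_vtt_transcript vtt_content (parse_vtt_transcript vtt_content)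

-- ===== LEMMAS AND PROOFS =====

-- the block builder, split at the end of the current run of non-blank lines
theorem pvBlocks_split (ls cur : List String) :
    pvBlocks cur ls =
      (if (cur ++ ls.takeWhile pvNonblank).isEmpty then []
       else [cur ++ ls.takeWhile pvNonblank]) ++
        pvBlocks [] ((ls.dropWhile pvNonblank).drop 1) := by
  induction ls generalizing cur with
  | nil => simp [pvBlocks]
  | cons l rest ih =>
    by_cases h : pvNonblank l = true
    · simp only [pvBlocks, h, if_pos, List.takeWhile_cons, List.dropWhile_cons]
      rw [ih (cur ++ [l])]
      simp
    · simp only [Bool.not_eq_true] at h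
      simp [pvBlocks, h]

-- a prefix of arrow-free lines contributes nothing to a block's entry
theorem pvBlockEntry_append (pre b : List String)
    (h : ∀ x ∈ pre, PySem.Str.isIn "-->" (PySem.Str.strip x) = false) :
    pvBlockEntry (pre ++ b) = pvBlockEntry b := by
  induction pre with
  | nil => rfl
  | cons x xs ih =>
    have hx := h x (by simp)
    simp only [List.cons_append, pvBlockEntry, hx, Bool.false_eq_true, if_false]
    exact ih (fun y hy => h y (by simp [hy]))

-- an arrow-free block yields no entry
theorem pvBlockEntry_nil (b : List String)
    (h : ∀ x ∈ b, PySem.Str.isIn "-->" (PySem.Str.strip x) = false) :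
    pvBlockEntry b = [] := by
  simpa using pvBlockEntry_append b [] h

theorem pvArrow_nonblank {l : String}
    (h : PySem.Str.isIn "-->" (PySem.Str.strip l) = true) : pvNonblank l = true := by
  unfold pvNonblank
  rcases eq_or_ne (PySem.Str.strip l) "" with he | he
  · rw [he] at h; exact absurd h (by decide)
  · simp [he]

-- main invariant: A's walk from any point equals B's remaining blocks' entries,
-- given that the lines already stored in the current block carry no arrow
theorem pvMain : ∀ (n : Nat) (ls cur : List String), ls.length ≤ n →
    (∀ x ∈ cur, PySem.Str.isIn "-->" (PySem.Str.strip x) = false) →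
    pvALoop ls = (pvBlocks cur ls).flatMap pvBlockEntry := by
  intro n
  induction n with
  | zero =>
    intro ls cur hlen hcur
    have : ls = [] := List.eq_nil_of_length_eq_zero (Nat.le_zero.mp hlen)
    subst this
    by_cases hc : cur.isEmpty <;>
      simp [pvALoop, pvBlocks, hc, pvBlockEntry_nil cur hcur]
  | succ n ih =>
    intro ls cur hlen hcur
    match ls with
    | [] => exact ih [] cur (by simp) hcur
    | l :: rest =>
      have hrest : rest.length ≤ n := by simpa using hlen
      by_cases ha : PySem.Str.isIn "-->" (PySem.Str.strip l) = true
      · -- arrow line: one entry from the block cur ++ [l] ++ run, then continue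
        have hnb : pvNonblank l = true := pvArrow_nonblank ha
        simp only [pvALoop, ha, if_true, pvBlocks, hnb]
        rw [pvBlocks_split rest (cur ++ [l])]
        have hdrop : ((rest.dropWhile pvNonblank).drop 1).length ≤ n := by
          have := List.length_dropWhile_le pvNonblank rest
          simp only [List.length_drop]; omega
        rw [List.flatMap_append,
            ← ih ((rest.dropWhile pvNonblank).drop 1) [] hdrop (by simp)]
        have hne : (((cur ++ [l]) ++ rest.takeWhile pvNonblank).isEmpty) = false := by
          simp
        rw [hne]
        simp only [Bool.false_eq_true, if_false, List.flatMap_cons, List.flatMap_nil,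
          List.append_nil]
        rw [List.append_assoc, pvBlockEntry_append cur ([l] ++ rest.takeWhile pvNonblank) hcur]
        simp only [List.singleton_append, pvBlockEntry, ha, if_true]
      · -- no arrow: A skips the line; B stores it (or closes the block)
        simp only [Bool.not_eq_true] at ha
        by_cases hnb : pvNonblank l = true
        · simp only [pvALoop, ha, Bool.false_eq_true, if_false, pvBlocks, hnb, if_true]
          exact ih rest (cur ++ [l]) hrest
            (by intro x hx; rcases List.mem_append.mp hx with h1 | h1
                · exact hcur x h1
                · simp only [List.mem_singleton] at h1; subst h1; exact ha)
        · simp only [Bool.not_eq_true] at hnb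
          simp only [pvALoop, ha, Bool.false_eq_true, if_false, pvBlocks, hnb,
            List.flatMap_append]
          rw [← ih rest [] hrest (by simp)]
          by_cases hc : cur.isEmpty <;> simp [hc, pvBlockEntry_nil cur hcur]

-- ===== VERDICT (by name: the statement is the Claim_ definition above) =====
theorem parse_vtt_transcript_spec : Claim_equal_parse_vtt_transcript := by
  intro vtt_content _
  unfold Spec_parse_vtt_transcript parse_vtt_transcript parse_vtt_transcript_alt
  exact pvMain (pvSplit vtt_content "\n").length _ [] (le_refl _) (by simp)
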